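-- pv_equiv track=rewrite | github.com/chribell/lcjoin | python/src/lcjoin/lib.py | successor_binary_search
-- ===== SOURCE A (Python) =====
-- def successor_binary_search(lst, x):
--     start = 0
--     end = len(lst) - 1
--     successor = -1
--
--     while start <= end:
--         mid = (start + end) // 2
--         if lst[mid] < x:
--             start = mid + 1
--         else:  # lst[mid] >= x:
--             successor = mid
--             end = mid - 1
--
--     return successor, lst[successor] if len(lst) > 0 else -1
-- ===== SOURCE B (Python) =====
-- def successor_binary_search(lst, x):
--     successor = -1
--     for i in range(len(lst)):
--         if lst[i] >= x:
--             successor = i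
--             break
--     return successor, lst[successor] if len(lst) > 0 else -1
-- ===== Notes on version B (the rewrite author's own statement) =====
-- stated objective: simpler
-- what changed: Replaces the halving binary search with a single forward linear scan that stops at the first element >= x, keeping the same return tuple (including the lst[-1] value when no successor exists and -1 for the empty list).
-- outside the precondition, e.g. on successor_binary_search([1, 0, 2], 1): A returns (2, 2), B returns (0, 1)
import Mathlib
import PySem

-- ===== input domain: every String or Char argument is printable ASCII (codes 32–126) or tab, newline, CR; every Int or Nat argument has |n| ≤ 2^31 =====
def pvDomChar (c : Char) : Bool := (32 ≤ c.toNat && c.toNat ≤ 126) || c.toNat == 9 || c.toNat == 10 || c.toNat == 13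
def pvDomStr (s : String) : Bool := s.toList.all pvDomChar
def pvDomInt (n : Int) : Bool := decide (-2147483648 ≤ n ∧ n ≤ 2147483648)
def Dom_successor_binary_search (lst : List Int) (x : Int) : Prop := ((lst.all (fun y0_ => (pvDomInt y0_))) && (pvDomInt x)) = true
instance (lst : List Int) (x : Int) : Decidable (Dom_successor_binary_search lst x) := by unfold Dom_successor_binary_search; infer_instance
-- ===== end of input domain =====

-- B replaces the binary search by a single forward linear scan (same return tuple); objective: simpler.

-- ===== PORT A =====
-- while loop of A; the fuel argument only makes the recursion total (lst.length + 1 always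
-- suffices); lst[mid] is always in range when reached, so pyGetD's default is never used
def sbsLoop (lst : List Int) (x : Int) : Nat → Int → Int → Int → Int
  | 0, _, _, successor => successor
  | fuel + 1, start, end_, successor =>
    if start ≤ end_ then
      let mid := PySem.Int.floordiv (start + end_) 2
      if PySem.List.pyGetD lst mid 0 < x then
        sbsLoop lst x fuel (mid + 1) end_ successor
      else
        sbsLoop lst x fuel start (mid - 1) mid
    else successor

def successor_binary_search (lst : List Int) (x : Int) : Int × Int :=
  let successor := sbsLoop lst x (lst.length + 1) 0 ((lst.length : Int) - 1) (-1)
  (successor, if (lst.length : Int) > 0 then PySem.List.pyGetD lst successor 0 else -1)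

-- ===== PORT B =====
-- the for-loop with break of Source B: first index whose element is ≥ x, else -1
def sbsScan (x : Int) : List Int → Int → Int
  | [], _ => -1
  | a :: rest, i => if a ≥ x then i else sbsScan x rest (i + 1)

def successor_binary_search_alt (lst : List Int) (x : Int) : Int × Int :=
  let successor := sbsScan x lst 0
  (successor, if (lst.length : Int) > 0 then PySem.List.pyGetD lst successor 0 else -1)

-- ===== PRECONDITION & SPEC =====
-- Pre_ excludes lists not partitioned around x (an element ≥ x followed by one < x), i.e.
-- inputs that violate the binary search's sortedness contract in a way the probe can see:
-- there A still returns a pair, but its index is an accident of the halving path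
-- (e.g. ([1,0,2],1): A gives (2,2), B gives the first match (0,1)).
def Pre_successor_binary_search (lst : List Int) (x : Int) : Prop :=
  ∀ i : Nat, i < lst.length → ∀ j : Nat, j < lst.length → i ≤ j →
    x ≤ lst.getD i 0 → x ≤ lst.getD j 0
instance (lst : List Int) (x : Int) : Decidable (Pre_successor_binary_search lst x) := by
  unfold Pre_successor_binary_search; infer_instance

def pvWitness_successor_binary_search : List Int × Int := ([1, 2, 2, 5], 2)

def Spec_successor_binary_search (lst : List Int) (x : Int) (out : Int × Int) : Prop := out = successor_binary_search_alt lst x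
instance (lst : List Int) (x : Int) (out : Int × Int) : Decidable (Spec_successor_binary_search lst x out) := by unfold Spec_successor_binary_search; infer_instance

-- ===== CLAIM (what is proved, stated in full; the proofs are below) =====
def Claim_equal_successor_binary_search : Prop := ∀ (lst : List Int) (x : Int), Dom_successor_binary_search lst x → Pre_successor_binary_search lst x → Spec_successor_binary_search lst x (successor_binary_search lst x)

-- ===== LEMMAS AND PROOFS =====

-- the scan returns -1 when no element is ≥ x
theorem sbsScan_none (x : Int) (l : List Int) (i : Int)
    (h : ∀ a ∈ l, a < x) : sbsScan x l i = -1 := by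
  induction l generalizing i with
  | nil => rfl
  | cons a rest ih =>
    have ha : a < x := h a (by simp)
    simp [sbsScan, not_le.mpr ha, ih (i + 1) (fun b hb => h b (by simp [hb]))]

-- the scan returns the index of the first element ≥ x
theorem sbsScan_hit (x : Int) (l1 : List Int) (a : Int) (l2 : List Int) (i : Int)
    (h1 : ∀ b ∈ l1, b < x) (ha : x ≤ a) :
    sbsScan x (l1 ++ a :: l2) i = i + (l1.length : Int) := by
  induction l1 generalizing i with
  | nil => simp [sbsScan, ha]
  | cons b rest ih =>
    have hb : b < x := h1 b (by simp)
    have := ih (i + 1) (fun c hc => h1 c (by simp [hc]))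
    simp [sbsScan, not_le.mpr hb, this]
    omega

-- loop invariant: below start everything is < x; succ is -1 with end_ untouched, or the
-- leftmost ≥ x found so far, sitting just right of end_
theorem sbsLoop_correct (lst : List Int) (x : Int)
    (hs : ∀ i : Nat, i < lst.length → ∀ j : Nat, j < lst.length → i ≤ j →
      x ≤ lst.getD i 0 → x ≤ lst.getD j 0) :
    ∀ (fuel : Nat) (start e succ : Int),
      0 ≤ start → start ≤ e + 1 → e ≤ (lst.length : Int) - 1 →
      (∀ j : Nat, (j : Int) < start → lst.getD j 0 < x) →
      ((succ = -1 ∧ e = (lst.length : Int) - 1) ∨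
        (succ = e + 1 ∧ succ ≤ (lst.length : Int) - 1 ∧ x ≤ lst.getD succ.toNat 0)) →
      (e - start + 2).toNat ≤ fuel →
      sbsLoop lst x fuel start e succ = sbsScan x lst 0 := by
  intro fuel
  induction fuel with
  | zero =>
    intro start e succ h0 h1 h2 _ _ hf
    omega
  | succ n ih =>
    intro start e succ h0 h1 h2 hlow hsucc hf
    by_cases hle : start ≤ e
    · -- loop body
      have hmid := PySem.Int.floordiv_two_mid_bounds hle
      set mid := PySem.Int.floordiv (start + e) 2 with hmiddef
      have hmid0 : 0 ≤ mid := le_trans h0 hmid.1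
      have hmidlt : mid < (lst.length : Int) := by omega
      have hmidn : mid.toNat < lst.length := by omega
      have hget : PySem.List.pyGetD lst mid 0 = lst.getD mid.toNat 0 := by
        rw [PySem.List.pyGetD_eq_getElem (xs := lst) (i := mid) (d := 0) hmid0 (by simpa using hmidlt)]
        rw [List.getD_eq_getElem lst 0 hmidn]
      have hstep : sbsLoop lst x (n + 1) start e succ =
          (if PySem.List.pyGetD lst mid 0 < x then sbsLoop lst x n (mid + 1) e succ
           else sbsLoop lst x n start (mid - 1) mid) := by
        rw [hmiddef]
        simp only [sbsLoop, if_pos hle]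
      by_cases hcmp : PySem.List.pyGetD lst mid 0 < x
      · -- go right
        rw [hstep, if_pos hcmp]
        refine ih (mid + 1) e succ (by omega) (by omega) h2 ?_ hsucc (by omega)
        intro j hj
        have hjn : j < lst.length := by omega
        -- j ≤ mid and lst[mid] < x: by the partition property lst[j] < x
        have hx : lst.getD mid.toNat 0 < x := by rwa [hget] at hcmp
        by_contra hc
        exact absurd (hs j hjn mid.toNat hmidn (by omega) (by omega)) (by omega)
      · -- found, go left
        rw [hstep, if_neg hcmp]
        refine ih start (mid - 1) mid h0 (by omega) (by omega) hlow ?_ (by omega)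
        right
        refine ⟨by omega, by omega, ?_⟩
        rw [hget] at hcmp
        omega
    · -- loop exits: start = e + 1
      have hstart : start = e + 1 := by omega
      have hstep : sbsLoop lst x (n + 1) start e succ = succ := by
        simp only [sbsLoop, if_neg hle]
      rw [hstep]
      rcases hsucc with ⟨hm1, he⟩ | ⟨hse, hsl, hsx⟩
      · -- no element ≥ x at all
        subst hm1
        have hall : ∀ a ∈ lst, a < x := by
          intro a ha
          obtain ⟨j, hjn, rfl⟩ := List.mem_iff_getElem.mp ha
          have := hlow j (by omega)
          rwa [List.getD_eq_getElem lst 0 hjn] at this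
        exact (sbsScan_none x lst 0 hall).symm
      · -- succ is the first index with lst[succ] ≥ x
        have hs0 : 0 ≤ succ := by omega
        have hsn : succ.toNat < lst.length := by omega
        have hdecomp : lst = lst.take succ.toNat ++ lst[succ.toNat] :: lst.drop (succ.toNat + 1) := by
          conv_lhs => rw [← List.take_append_drop succ.toNat lst]
          rw [List.drop_eq_getElem_cons hsn]
        have hlen : (lst.take succ.toNat).length = succ.toNat := by
          simp [List.length_take]; omega
        have hfirst : ∀ b ∈ lst.take succ.toNat, b < x := by
          intro b hb
          obtain ⟨j, hjlen, rfl⟩ := List.mem_iff_getElem.mp hb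
          rw [List.getElem_take]
          have hjn : j < lst.length := by omega
          have := hlow j (by omega)
          rwa [List.getD_eq_getElem lst 0 hjn] at this
        have hx : x ≤ lst[succ.toNat] := by
          rwa [List.getD_eq_getElem lst 0 hsn] at hsx
        calc succ = 0 + ((lst.take succ.toNat).length : Int) := by rw [hlen]; omega
          _ = sbsScan x (lst.take succ.toNat ++ lst[succ.toNat] :: lst.drop (succ.toNat + 1)) 0 := by
                rw [sbsScan_hit x _ _ _ 0 hfirst hx]
          _ = sbsScan x lst 0 := by rw [← hdecomp]

-- ===== VERDICT (by name: the statement is the Claim_ definition above) =====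
theorem successor_binary_search_spec : Claim_equal_successor_binary_search := by
  intro lst x _ hpre
  unfold Spec_successor_binary_search successor_binary_search successor_binary_search_alt
  have h := sbsLoop_correct lst x (by exact hpre) (lst.length + 1) 0 ((lst.length : Int) - 1) (-1)
      (by omega) (by omega) (by omega)
      (by intro j hj; omega)
      (by left; exact ⟨rfl, rfl⟩)
      (by omega)
  simp only [h]
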